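-- pv_equiv track=rewrite | github.com/Moeblack/Moebot | legacy_v1/bot_agent/handlers/link_utils/bilibili_card.py | choose_best_bilibili_url
-- ===== SOURCE A (Python) =====
-- _BILIBILI_HOST_KEYWORDS = (
--     "bilibili.com",
--     "b23.tv",
--     "bilivideo.com",
--     "bili.tv",
-- )
--
-- def _contains_bilibili_host(url: str) -> bool:
--     url_l = url.lower()
--     return any(k in url_l for k in _BILIBILI_HOST_KEYWORDS)
--
-- def choose_best_bilibili_url(urls: list[str]) -> str | None:
--     """在候选 URL 中挑选一个“最像视频/动态/直播”的主链接。"""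
--     bilis = [u for u in urls if _contains_bilibili_host(u)]
--     if not bilis:
--         return None
--
--     # 优先级：视频 > 动态 > 直播 > 短链 > 其他
--     def score(u: str) -> int:
--         ul = u.lower()
--         if "bilibili.com/video/" in ul or "bv" in ul:
--             return 100
--         if "t.bilibili.com/" in ul or "dynamic" in ul:
--             return 90
--         if "live.bilibili.com/" in ul:
--             return 80
--         if "b23.tv/" in ul:
--             return 70
--         return 10
--
--     return sorted(bilis, key=score, reverse=True)[0]
-- ===== SOURCE B (Python) =====
-- _BILIBILI_HOST_KEYWORDS = (
--     "bilibili.com",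
--     "b23.tv",
--     "bilivideo.com",
--     "bili.tv",
-- )
--
-- def _score_lowered(ul):
--     if "bilibili.com/video/" in ul or "bv" in ul:
--         return 100
--     if "t.bilibili.com/" in ul or "dynamic" in ul:
--         return 90
--     if "live.bilibili.com/" in ul:
--         return 80
--     if "b23.tv/" in ul:
--         return 70
--     return 10
--
-- def choose_best_bilibili_url(urls):
--     """Single pass: keep the first bilibili URL with the strictly highest score."""
--     best_url = None
--     best_score = -1
--     for u in urls:
--         ul = u.lower()
--         if not any(k in ul for k in _BILIBILI_HOST_KEYWORDS):
--             continue
--         s = _score_lowered(ul)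
--         if s > best_score:
--             best_url, best_score = u, s
--     return best_url
-- ===== Notes on version B (the rewrite author's own statement) =====
-- stated objective: alternative
-- what changed: Replaces filter-then-stable-sort-then-take-first with a single scan over urls keeping the first strictly-highest-scoring bilibili URL (None if nothing matches).
import Mathlib
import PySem

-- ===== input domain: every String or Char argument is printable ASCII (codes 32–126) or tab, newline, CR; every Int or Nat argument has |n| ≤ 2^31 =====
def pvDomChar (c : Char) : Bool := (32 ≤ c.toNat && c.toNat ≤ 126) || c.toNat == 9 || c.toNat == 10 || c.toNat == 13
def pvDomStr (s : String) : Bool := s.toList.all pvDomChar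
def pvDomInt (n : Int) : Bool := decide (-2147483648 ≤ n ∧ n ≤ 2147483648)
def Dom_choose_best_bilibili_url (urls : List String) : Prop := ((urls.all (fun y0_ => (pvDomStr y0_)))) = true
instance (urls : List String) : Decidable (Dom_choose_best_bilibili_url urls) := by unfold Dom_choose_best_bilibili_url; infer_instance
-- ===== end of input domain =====

-- B replaces A's filter-then-stable-sort-then-take-first by a single scan keeping the
-- first strictly-highest-scoring bilibili URL (objective: alternative single-pass algorithm).

-- ===== PORT A =====
def pvKeywords : List String := ["bilibili.com", "b23.tv", "bilivideo.com", "bili.tv"]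

def contains_bilibili_host (url : String) : Bool :=
  let url_l := PySem.Str.lower url
  pvKeywords.any (fun k => PySem.Str.isIn k url_l)

def pvScore (u : String) : Int :=
  let ul := PySem.Str.lower u
  if PySem.Str.isIn "bilibili.com/video/" ul || PySem.Str.isIn "bv" ul then 100
  else if PySem.Str.isIn "t.bilibili.com/" ul || PySem.Str.isIn "dynamic" ul then 90
  else if PySem.Str.isIn "live.bilibili.com/" ul then 80
  else if PySem.Str.isIn "b23.tv/" ul then 70
  else 10

def choose_best_bilibili_url (urls : List String) : Option String :=
  let bilis := urls.filter contains_bilibili_host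
  match PySem.List.sorted bilis pvScore true with
  | [] => none
  | m :: _ => some m

-- ===== PORT B =====
def altScoreLowered (ul : String) : Int :=
  if PySem.Str.isIn "bilibili.com/video/" ul || PySem.Str.isIn "bv" ul then 100
  else if PySem.Str.isIn "t.bilibili.com/" ul || PySem.Str.isIn "dynamic" ul then 90
  else if PySem.Str.isIn "live.bilibili.com/" ul then 80
  else if PySem.Str.isIn "b23.tv/" ul then 70
  else 10

def altStep (st : Option String × Int) (u : String) : Option String × Int :=
  let ul := PySem.Str.lower u
  if !(pvKeywords.any (fun k => PySem.Str.isIn k ul)) then st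
  else
    let s := altScoreLowered ul
    if st.2 < s then (some u, s) else st

def choose_best_bilibili_url_alt (urls : List String) : Option String :=
  (urls.foldl altStep (none, -1)).1

-- ===== PRECONDITION & SPEC =====
def Spec_choose_best_bilibili_url (urls : List String) (out : Option String) : Prop := out = choose_best_bilibili_url_alt urls
instance (urls : List String) (out : Option String) : Decidable (Spec_choose_best_bilibili_url urls out) := by unfold Spec_choose_best_bilibili_url; infer_instance

-- ===== CLAIM (what is proved, stated in full; the proofs are below) =====
def Claim_equal_choose_best_bilibili_url : Prop := ∀ (urls : List String), Dom_choose_best_bilibili_url urls → Spec_choose_best_bilibili_url urls (choose_best_bilibili_url urls)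

-- ===== LEMMAS AND PROOFS =====

-- step over the already-filtered list (B's update, with the host test gone)
def pvStep2 (st : Option String × Int) (u : String) : Option String × Int :=
  if st.2 < pvScore u then (some u, pvScore u) else st

lemma altStep_eq (st : Option String × Int) (u : String) :
    altStep st u = if contains_bilibili_host u then pvStep2 st u else st := by
  have hsc : altScoreLowered (PySem.Str.lower u) = pvScore u := rfl
  cases hc : pvKeywords.any (fun k => PySem.Str.isIn k (PySem.Str.lower u)) <;>
    simp only [altStep, contains_bilibili_host, pvStep2, hc, hsc, Bool.not_true,
      Bool.not_false] <;> simp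

lemma foldl_altStep_filter (l : List String) (st : Option String × Int) :
    l.foldl altStep st = (l.filter contains_bilibili_host).foldl pvStep2 st := by
  induction l generalizing st with
  | nil => rfl
  | cons x t ih =>
    by_cases h : contains_bilibili_host x = true <;>
      simp [h, altStep_eq, ih]

lemma pvScore_gt_neg_one (u : String) : (-1 : Int) < pvScore u := by
  simp only [pvScore]; split_ifs <;> norm_num

def pvInv (acc : List String) (st : Option String × Int) : Prop :=
  (acc = [] ∧ st = (none, -1)) ∨ (∃ b t, acc = b :: t ∧ st = (some b, pvScore b))

lemma pvInv_step (acc : List String) (st : Option String × Int) (u : String)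
    (h : pvInv acc st) :
    pvInv (PySem.List.insertBy (fun a b => decide (pvScore b < pvScore a)) u acc)
          (pvStep2 st u) := by
  rcases h with ⟨hacc, hst⟩ | ⟨b, t, hacc, hst⟩
  · subst hacc; subst hst
    right
    exact ⟨u, [], by simp [PySem.List.insertBy], by simp [pvStep2, pvScore_gt_neg_one u]⟩
  · subst hacc; subst hst
    by_cases hlt : pvScore b < pvScore u
    · right
      refine ⟨u, b :: t, ?_, ?_⟩
      · simp [PySem.List.insertBy, hlt]
      · simp [pvStep2, hlt]
    · right
      refine ⟨b, PySem.List.insertBy (fun a b => decide (pvScore b < pvScore a)) u t, ?_, ?_⟩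
      · simp [PySem.List.insertBy, hlt]
      · simp [pvStep2, hlt]

lemma pvInv_foldl (l : List String) (acc : List String) (st : Option String × Int)
    (h : pvInv acc st) :
    pvInv (l.foldl (fun a x => PySem.List.insertBy (fun a b => decide (pvScore b < pvScore a)) x a) acc)
          (l.foldl pvStep2 st) := by
  induction l generalizing acc st with
  | nil => exact h
  | cons x t ih => exact ih _ _ (pvInv_step _ _ _ h)

-- ===== VERDICT (by name: the statement is the Claim_ definition above) =====
theorem choose_best_bilibili_url_spec : Claim_equal_choose_best_bilibili_url := by
  intro urls _
  have h := pvInv_foldl (urls.filter contains_bilibili_host) [] (none, -1) (Or.inl ⟨rfl, rfl⟩)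
  rw [← PySem.List.sorted_rev_eq_foldl_insertBy] at h
  rcases h with ⟨hacc, hst⟩ | ⟨b, t, hacc, hst⟩ <;>
    simp [Spec_choose_best_bilibili_url, choose_best_bilibili_url, choose_best_bilibili_url_alt,
      foldl_altStep_filter, hacc, hst]
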